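-- pv_equiv track=rewrite | github.com/douymLab/PhyloSOLID | src/scaffold_builder.py | find_all_path_nodes_scaffold
-- ===== SOURCE A (Python) =====
-- def find_all_path_nodes_scaffold(intersection_nodes, tree_parent_dict):
--     """
--     找到所有在连接交集节点的路径上的节点
--     """
--     all_path_nodes = set()
--     all_path_nodes.add('ROOT')  # 总是包含 ROOT
--
--     # 对于每个交集节点，找到从 ROOT 到该节点的路径
--     for node in intersection_nodes:
--         path_to_root = get_path_to_root_scaffold(node, tree_parent_dict)
--         all_path_nodes.update(path_to_root)
--
--     # 找到连接不同交集节点的路径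
--     intersection_list = list(intersection_nodes)
--     for i in range(len(intersection_list)):
--         for j in range(i + 1, len(intersection_list)):
--             path_between = get_path_between_nodes_scaffold(intersection_list[i], intersection_list[j], tree_parent_dict)
--             all_path_nodes.update(path_between)
--
--     return all_path_nodes
--
-- def get_path_to_root_scaffold(node, tree_parent_dict):
--     """找到从节点到 ROOT 的路径"""
--     path = []
--     current = node
--     while current in tree_parent_dict:
--         path.append(current)
--         current = tree_parent_dict[current]
--         if current == 'ROOT':
--             path.append('ROOT')
--             break
--     return path
--
-- def get_path_between_nodes_scaffold(node1, node2, tree_parent_dict):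
--     """找到两个节点之间的路径"""
--     # 找到从 node1 到 ROOT 的路径
--     path1 = get_path_to_root_scaffold(node1, tree_parent_dict)
--     # 找到从 node2 到 ROOT 的路径
--     path2 = get_path_to_root_scaffold(node2, tree_parent_dict)
--
--     # 反转路径，使其从 ROOT 开始
--     path1_from_root = list(reversed(path1))
--     path2_from_root = list(reversed(path2))
--
--     # 找到最近公共祖先 (LCA)
--     lca = None
--     for i in range(min(len(path1_from_root), len(path2_from_root))):
--         if path1_from_root[i] == path2_from_root[i]:
--             lca = path1_from_root[i]
--         else:
--             break
--
--     if lca is None: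
--         return []
--
--     # 构建完整路径: node1 -> LCA -> node2
--     lca_index1 = path1_from_root.index(lca)
--     lca_index2 = path2_from_root.index(lca)
--
--     path_node1_to_lca = path1_from_root[lca_index1:]
--     path_lca_to_node2 = path2_from_root[lca_index2:]
--
--     # 合并路径，去掉重复的 LCA
--     full_path = path_node1_to_lca + path_lca_to_node2[1:]
--     return full_path
-- ===== SOURCE B (Python) =====
-- def find_all_path_nodes_scaffold(intersection_nodes, tree_parent_dict):
--     """
--     All nodes on paths among intersection nodes.  The path between two nodes
--     (node1 -> LCA -> node2) consists solely of nodes that lie on the two nodes'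
--     own root paths, so the pairwise stage of the original is redundant: it is
--     enough to climb each intersection node's parent chain once.
--     """
--     result = {'ROOT'}
--     for node in intersection_nodes:
--         cur = node
--         while cur in tree_parent_dict:
--             result.add(cur)
--             cur = tree_parent_dict[cur]
--             if cur == 'ROOT':
--                 break
--     return result
-- ===== Notes on version B (the rewrite author's own statement) =====
-- stated objective: faster
-- what changed: Drops the quadratic pairwise between-path stage entirely (every between-path is a subset of the two endpoints' root paths, which are already collected) and climbs each node's parent chain directly into the result set instead of materialising, reversing and LCA-splicing path lists.
import Mathlib
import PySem

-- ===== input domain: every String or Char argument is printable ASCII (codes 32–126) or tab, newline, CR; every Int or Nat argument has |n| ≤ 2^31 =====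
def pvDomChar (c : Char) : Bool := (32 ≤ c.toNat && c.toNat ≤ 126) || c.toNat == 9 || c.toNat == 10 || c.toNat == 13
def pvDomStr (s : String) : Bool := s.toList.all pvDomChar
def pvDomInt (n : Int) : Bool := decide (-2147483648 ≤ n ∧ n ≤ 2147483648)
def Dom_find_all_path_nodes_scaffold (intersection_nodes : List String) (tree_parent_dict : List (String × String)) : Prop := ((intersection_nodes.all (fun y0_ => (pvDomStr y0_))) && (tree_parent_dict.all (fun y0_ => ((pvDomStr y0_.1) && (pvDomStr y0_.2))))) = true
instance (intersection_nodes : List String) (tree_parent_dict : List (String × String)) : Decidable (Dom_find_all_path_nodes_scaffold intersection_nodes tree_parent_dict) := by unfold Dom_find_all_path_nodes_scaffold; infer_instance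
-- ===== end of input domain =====

-- B drops A's O(n^2) pairwise between-path stage (each between-path is a subset of the
-- two endpoints' root paths, already collected) and climbs each parent chain directly
-- into the result set; objective: faster (asymptotic). The returned value is a Python
-- set, compared as a finite set against the Pythons.

-- ===== PORT A =====
-- get_path_to_root_scaffold: the while loop is ported with fuel tree_parent_dict.length + 1;
-- inside Pre_ the loop provably exits before the fuel does (the visited chain states are
-- pairwise-distinct dict keys), so the fuel-0 branch is never taken there.
def pathToRootA (fuel : Nat) (node : String) (d : PySem.Dict String String) : List String :=
  match fuel with
  | 0 => []
  | fuel + 1 =>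
    match d.get? node with
    | none => []
    | some parent =>
      if parent = "ROOT" then [node, "ROOT"] else node :: pathToRootA fuel parent d

-- 'for i in range(min(len(p1), len(p2))): if p1[i] == p2[i]: lca = p1[i] else: break'
def lcaLoopA (p1 p2 : List String) (i : Nat) (lca : Option String) : Option String :=
  if h : i < min p1.length p2.length then
    if p1[i]'(by omega) = p2[i]'(by omega) then lcaLoopA p1 p2 (i + 1) (some (p1[i]'(by omega)))
    else lca
  else lca
termination_by min p1.length p2.length - i

-- get_path_between_nodes_scaffold; lca is always an element of p1 and of p2, so the
-- Python '.index' cannot raise and the '.getD 0' default is never used; the slices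
-- p[i:] (nonnegative i) and p[1:] are List.drop.
def pathBetweenA (fuel : Nat) (n1 n2 : String) (d : PySem.Dict String String) : List String :=
  let path1 := pathToRootA fuel n1 d
  let path2 := pathToRootA fuel n2 d
  let p1 := path1.reverse
  let p2 := path2.reverse
  match lcaLoopA p1 p2 0 none with
  | none => []
  | some lca =>
    let i1 := (PySem.List.index? p1 lca).getD 0
    let i2 := (PySem.List.index? p2 lca).getD 0
    p1.drop i1 ++ (p2.drop i2).drop 1

-- the nested 'for i in range(len(lst)): for j in range(i+1, len(lst))' loops; the list
-- indices are in range, so 'lst.getD _ ""' is exactly lst[i] / lst[j].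
def find_all_path_nodes_scaffold (intersection_nodes : List String) (tree_parent_dict : List (String × String)) : List String :=
  let d := PySem.Dict.ofList tree_parent_dict
  let fuel := tree_parent_dict.length + 1
  let s : PySem.Set String := PySem.Set.add PySem.Set.empty "ROOT"
  let s := intersection_nodes.foldl (fun s node => PySem.Set.update s (pathToRootA fuel node d)) s
  let lst := intersection_nodes
  (List.range lst.length).foldl (fun s i =>
    (List.range' (i + 1) (lst.length - (i + 1))).foldl (fun s j =>
      PySem.Set.update s (pathBetweenA fuel (lst.getD i "") (lst.getD j "") d)) s) s

-- ===== PORT B =====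
-- B's inner while loop, same fuel convention as A's loop.
def climbB (fuel : Nat) (cur : String) (d : PySem.Dict String String) (result : PySem.Set String) : PySem.Set String :=
  match fuel with
  | 0 => result
  | fuel + 1 =>
    match d.get? cur with
    | none => result
    | some parent =>
      let result := PySem.Set.add result cur
      if parent = "ROOT" then result else climbB fuel parent d result

def find_all_path_nodes_scaffold_alt (intersection_nodes : List String) (tree_parent_dict : List (String × String)) : List String :=
  let d := PySem.Dict.ofList tree_parent_dict
  intersection_nodes.foldl (fun result node => climbB (tree_parent_dict.length + 1) node d result)
    (PySem.Set.add PySem.Set.empty "ROOT")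

-- ===== PRECONDITION & SPEC =====
-- one step of A's while loop state: stop (fixpoint) at 'ROOT' or at a non-key, else move to the parent
def pvStepScaffold (d : PySem.Dict String String) (x : String) : String :=
  if x = "ROOT" then x else (d.get? x).getD x

-- Pre_ excludes exactly the inputs on which Python A never RETURNS: an intersection node
-- whose parent chain cycles without reaching 'ROOT' or leaving the key set makes A's
-- while loop diverge.  Stated as: from each intersection node that is a key, iterating
-- the parent map tree_parent_dict.length times (enough steps, since a terminating chain
-- visits pairwise-distinct keys) reaches 'ROOT' or a non-key.
def Pre_find_all_path_nodes_scaffold (intersection_nodes : List String) (tree_parent_dict : List (String × String)) : Prop :=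
  ∀ n ∈ intersection_nodes,
    (PySem.Dict.ofList tree_parent_dict).contains n = true →
      ((pvStepScaffold (PySem.Dict.ofList tree_parent_dict))^[tree_parent_dict.length]
          (((PySem.Dict.ofList tree_parent_dict).get? n).getD n) = "ROOT" ∨
        (PySem.Dict.ofList tree_parent_dict).contains
          ((pvStepScaffold (PySem.Dict.ofList tree_parent_dict))^[tree_parent_dict.length]
            (((PySem.Dict.ofList tree_parent_dict).get? n).getD n)) = false)

instance (intersection_nodes : List String) (tree_parent_dict : List (String × String)) : Decidable (Pre_find_all_path_nodes_scaffold intersection_nodes tree_parent_dict) := by unfold Pre_find_all_path_nodes_scaffold; infer_instance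

def pvWitness_find_all_path_nodes_scaffold : List String × (List (String × String)) :=
  (["b", "a"], [("a", "ROOT"), ("b", "a"), ("c", "b")])

def Spec_find_all_path_nodes_scaffold (intersection_nodes : List String) (tree_parent_dict : List (String × String)) (out : List String) : Prop := out = find_all_path_nodes_scaffold_alt intersection_nodes tree_parent_dict
instance (intersection_nodes : List String) (tree_parent_dict : List (String × String)) (out : List String) : Decidable (Spec_find_all_path_nodes_scaffold intersection_nodes tree_parent_dict out) := by unfold Spec_find_all_path_nodes_scaffold; infer_instance

-- ===== CLAIM (what is proved, stated in full; the proofs are below) =====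
def Claim_equal_find_all_path_nodes_scaffold : Prop := ∀ (intersection_nodes : List String) (tree_parent_dict : List (String × String)), Dom_find_all_path_nodes_scaffold intersection_nodes tree_parent_dict → Pre_find_all_path_nodes_scaffold intersection_nodes tree_parent_dict → Spec_find_all_path_nodes_scaffold intersection_nodes tree_parent_dict (find_all_path_nodes_scaffold intersection_nodes tree_parent_dict)

-- ===== LEMMAS AND PROOFS =====

-- one climb of B = one set.update of A's phase 1 (needs only 'ROOT' already in the set)
theorem climbB_eq_update (fuel : Nat) (cur : String) (d : PySem.Dict String String)
    (s : PySem.Set String) (hroot : "ROOT" ∈ s) :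
    climbB fuel cur d s = PySem.Set.update s (pathToRootA fuel cur d) := by
  induction fuel generalizing cur s with
  | zero => simp [climbB, pathToRootA, PySem.Set.update]
  | succ f ih =>
    simp only [climbB, pathToRootA]
    cases hget : d.get? cur with
    | none => simp [PySem.Set.update]
    | some parent =>
      by_cases hr : parent = "ROOT"
      · simp only [hr]
        have h1 : "ROOT" ∈ PySem.Set.add s cur := by
          rw [PySem.Set.mem_add]; exact Or.inl hroot
        simp [PySem.Set.update, PySem.Set.add_of_mem h1]
      · simp only [if_neg hr]
        rw [ih parent (PySem.Set.add s cur) (by rw [PySem.Set.mem_add]; exact Or.inl hroot)]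
        simp [PySem.Set.update]

-- A's phase-1 fold = B's whole fold
theorem phase1_eq_alt (nodes : List String) (d : PySem.Dict String String) (F : Nat)
    (s : PySem.Set String) (hroot : "ROOT" ∈ s) :
    nodes.foldl (fun s node => PySem.Set.update s (pathToRootA F node d)) s
      = nodes.foldl (fun result node => climbB F node d result) s := by
  induction nodes generalizing s with
  | nil => rfl
  | cons n t ih =>
    simp only [List.foldl_cons]
    rw [← climbB_eq_update F n d s hroot]
    exact ih _ (by rw [climbB_eq_update F n d s hroot, PySem.Set.mem_update]; exact Or.inl hroot)

-- the phase-1 fold only grows the set …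
theorem mem_phase1_of_mem (nodes : List String) (d : PySem.Dict String String) (F : Nat)
    (s : PySem.Set String) (x : String) (hx : x ∈ s) :
    x ∈ nodes.foldl (fun s node => PySem.Set.update s (pathToRootA F node d)) s := by
  induction nodes generalizing s with
  | nil => exact hx
  | cons n t ih =>
    exact ih _ (by rw [PySem.Set.mem_update]; exact Or.inl hx)

-- … and covers every root path of every listed node
theorem phase1_covers (nodes : List String) (d : PySem.Dict String String) (F : Nat)
    (s : PySem.Set String) (n : String) (hn : n ∈ nodes) (y : String)
    (hy : y ∈ pathToRootA F n d) :
    y ∈ nodes.foldl (fun s node => PySem.Set.update s (pathToRootA F node d)) s := by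
  induction nodes generalizing s with
  | nil => cases hn
  | cons m t ih =>
    simp only [List.foldl_cons]
    rcases List.mem_cons.mp hn with h | h
    · subst h
      exact mem_phase1_of_mem t d F _ y (by rw [PySem.Set.mem_update]; exact Or.inr hy)
    · exact ih _ h

-- every element of a between-path lies on one of the two endpoints' root paths
theorem pathBetweenA_subset (F : Nat) (n1 n2 : String) (d : PySem.Dict String String)
    (y : String) (hy : y ∈ pathBetweenA F n1 n2 d) :
    y ∈ pathToRootA F n1 d ∨ y ∈ pathToRootA F n2 d := by
  unfold pathBetweenA at hy
  simp only at hy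
  cases hl : lcaLoopA (pathToRootA F n1 d).reverse (pathToRootA F n2 d).reverse 0 none with
  | none => rw [hl] at hy; cases hy
  | some lca =>
    rw [hl] at hy
    rcases List.mem_append.mp hy with h | h
    · exact Or.inl (List.mem_reverse.mp (List.mem_of_mem_drop h))
    · exact Or.inr (List.mem_reverse.mp (List.mem_of_mem_drop (List.mem_of_mem_drop h)))

-- updating with elements already present is a no-op
theorem update_of_subset (s : PySem.Set String) (l : List String) (h : ∀ y ∈ l, y ∈ s) :
    PySem.Set.update s l = s := by
  induction l generalizing s with
  | nil => rfl
  | cons x t ih =>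
    have : PySem.Set.add s x = s := PySem.Set.add_of_mem (h x (List.mem_cons_self))
    calc PySem.Set.update s (x :: t)
        = PySem.Set.update (PySem.Set.add s x) t := by rw [PySem.Set.update_cons]
      _ = PySem.Set.update s t := by rw [this]
      _ = s := ih s (fun y hy => h y (List.mem_cons_of_mem _ hy))

-- a fold each of whose steps fixes s is the identity
theorem foldl_fix {α : Type} (l : List α) (f : PySem.Set String → α → PySem.Set String)
    (s : PySem.Set String) (h : ∀ a ∈ l, f s a = s) : l.foldl f s = s := by
  induction l with
  | nil => rfl
  | cons a t ih =>
    simp only [List.foldl_cons, h a List.mem_cons_self]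
    exact ih (fun b hb => h b (List.mem_cons_of_mem _ hb))

-- ===== VERDICT (by name: the statement is the Claim_ definition above) =====
theorem find_all_path_nodes_scaffold_spec : Claim_equal_find_all_path_nodes_scaffold := by
  intro nodes tpd _hdom _hpre
  unfold Spec_find_all_path_nodes_scaffold
  unfold find_all_path_nodes_scaffold find_all_path_nodes_scaffold_alt
  simp only
  set d := PySem.Dict.ofList tpd with hd
  set F := tpd.length + 1 with hF
  set s0 : PySem.Set String := PySem.Set.add PySem.Set.empty "ROOT" with hs0
  have hroot0 : "ROOT" ∈ s0 := by rw [hs0]; simp [PySem.Set.add, PySem.Set.empty, PySem.Set.contains]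
  set s1 := nodes.foldl (fun s node => PySem.Set.update s (pathToRootA F node d)) s0 with hs1
  have hcov : ∀ n ∈ nodes, ∀ y ∈ pathToRootA F n d, y ∈ s1 := by
    intro n hn y hy; exact phase1_covers nodes d F s0 n hn y hy
  have houter : (List.range nodes.length).foldl (fun s i =>
      (List.range' (i + 1) (nodes.length - (i + 1))).foldl (fun s j =>
        PySem.Set.update s (pathBetweenA F (nodes.getD i "") (nodes.getD j "") d)) s) s1 = s1 := by
    apply foldl_fix
    intro i hi
    have hilt : i < nodes.length := List.mem_range.mp hi
    apply foldl_fix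
    intro j hj
    have hjlt : j < nodes.length := by
      have := List.mem_range'.mp hj
      omega
    apply update_of_subset
    intro y hy
    rcases pathBetweenA_subset F (nodes.getD i "") (nodes.getD j "") d y hy with h | h
    · exact hcov _ (by rw [List.getD_eq_getElem _ _ hilt]; exact List.getElem_mem hilt) y h
    · exact hcov _ (by rw [List.getD_eq_getElem _ _ hjlt]; exact List.getElem_mem hjlt) y h
  rw [houter, hs1, phase1_eq_alt nodes d F s0 hroot0]
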